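-- pv_equiv track=rewrite | github.com/4nemi/typical90 | 067.py | tonine
-- ===== SOURCE A (Python) =====
-- def tonine(n):
--     if n == 0:
--         return 0
--     r = ''
--     while n > 0:
--         if n%9 != 8:
--             r += str(n%9)
--         else:
--             r += '5'
--         n //= 9
--     return int(r[::-1])
-- ===== SOURCE B (Python) =====
-- def tonine(n):
--     if n == 0:
--         return 0
--     r = n % 9
--     return tonine(n // 9) * 10 + (5 if r == 8 else r)
-- ===== Notes on version B (the rewrite author's own statement) =====
-- stated objective: simpler
-- what changed: Replaces the LSB-first string buffer + slice reversal + int() re-parse with a direct recursion that assembles the decimal result arithmetically, most-significant digit first, via a multiply-by-ten recurrence.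
import Mathlib
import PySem

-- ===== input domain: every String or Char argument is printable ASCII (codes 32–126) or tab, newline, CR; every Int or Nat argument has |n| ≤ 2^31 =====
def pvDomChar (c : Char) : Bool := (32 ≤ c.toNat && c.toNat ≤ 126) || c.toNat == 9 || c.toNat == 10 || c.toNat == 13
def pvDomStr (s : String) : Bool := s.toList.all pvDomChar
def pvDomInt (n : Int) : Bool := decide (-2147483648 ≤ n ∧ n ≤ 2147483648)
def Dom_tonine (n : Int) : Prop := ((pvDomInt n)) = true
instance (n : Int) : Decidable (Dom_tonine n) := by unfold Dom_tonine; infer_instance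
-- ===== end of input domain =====

-- B replaces A's LSB-first digit-string buffer + slice reversal + int() re-parse by a direct
-- arithmetic recursion assembling the decimal result most-significant-digit first (simpler).

-- ===== PORT A =====
-- int(s): hand-ported digit parser. In A, the parsed string r[::-1] is always a non-empty
-- list of decimal digit characters (each digit of n in base 9 is 0..8, written as '0'..'7'
-- or '5'), and on such strings this fold is exactly Python's int(). (For n < 0 Python's
-- int('') raises ValueError; those inputs are excluded by Pre_tonine.)
def parseIntDigits (cs : List Char) : Int :=
  cs.foldl (fun a c => a * 10 + ((c.toNat : Int) - 48)) 0

-- the while-loop of A: r accumulates the mapped base-9 digits LSB first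
def tonineLoop (n : Int) (r : List Char) : List Char :=
  if 0 < n then
    tonineLoop (PySem.Int.floordiv n 9)
      (if PySem.Int.mod n 9 ≠ 8 then r ++ PySem.Int.toChars (PySem.Int.mod n 9) else r ++ ['5'])
  else r
termination_by n.toNat
decreasing_by
  have h9 : (0:Int) < 9 := by omega
  rw [PySem.Int.floordiv_eq_ediv_of_pos h9]
  omega

def tonine (n : Int) : Int :=
  if n = 0 then 0
  else
    -- r[::-1] is PySem.List.slice? … (-1); int() raises on n < 0 (empty string), excluded by Pre_
    parseIntDigits ((PySem.List.slice? (tonineLoop n []) none none (-1)).getD [])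

-- ===== PORT B =====
def tonine_alt (n : Int) : Int :=
  if n = 0 then 0
  else if n < 0 then 0  -- Python B never returns here (unbounded recursion); guard for totality, outside Pre_
  else
    tonine_alt (PySem.Int.floordiv n 9) * 10 +
      (if PySem.Int.mod n 9 = 8 then 5 else PySem.Int.mod n 9)
termination_by n.toNat
decreasing_by
  have h9 : (0:Int) < 9 := by omega
  rw [PySem.Int.floordiv_eq_ediv_of_pos h9]
  omega

-- ===== PRECONDITION & SPEC =====
-- Pre_ excludes exactly the inputs n < 0, on which A raises ValueError (int('')).
def Pre_tonine (n : Int) : Prop := 0 ≤ n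
instance (n : Int) : Decidable (Pre_tonine n) := by unfold Pre_tonine; infer_instance
def pvWitness_tonine : Int := (42)
def Spec_tonine (n : Int) (out : Int) : Prop := out = tonine_alt n
instance (n : Int) (out : Int) : Decidable (Spec_tonine n out) := by unfold Spec_tonine; infer_instance

-- ===== CLAIM (what is proved, stated in full; the proofs are below) =====
def Claim_equal_tonine : Prop := ∀ (n : Int), Dom_tonine n → Pre_tonine n → Spec_tonine n (tonine n)

-- ===== LEMMAS AND PROOFS =====

theorem tonineLoop_append (n : Int) (r : List Char) :
    tonineLoop n r = r ++ tonineLoop n [] := by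
  by_cases h : 0 < n
  · have ih := tonineLoop_append (PySem.Int.floordiv n 9)
    conv_lhs => rw [tonineLoop, if_pos h]
    conv_rhs => rw [tonineLoop, if_pos h]
    by_cases h8 : PySem.Int.mod n 9 ≠ 8
    · rw [if_pos h8, if_pos h8,
        ih (r ++ PySem.Int.toChars (PySem.Int.mod n 9)),
        ih ([] ++ PySem.Int.toChars (PySem.Int.mod n 9))]
      simp
    · rw [if_neg h8, if_neg h8, ih (r ++ ['5']), ih ([] ++ ['5'])]
      simp
  · conv_lhs => rw [tonineLoop, if_neg h]
    conv_rhs => rw [tonineLoop, if_neg h]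
    simp
termination_by n.toNat
decreasing_by
  have h9 : (0:Int) < 9 := by omega
  rw [PySem.Int.floordiv_eq_ediv_of_pos h9]
  omega

theorem parseIntDigits_append (xs : List Char) (c : Char) :
    parseIntDigits (xs ++ [c]) = parseIntDigits xs * 10 + ((c.toNat : Int) - 48) := by
  simp [parseIntDigits]

theorem tonine_loop_eq_alt (n : Int) (hn : 0 ≤ n) :
    parseIntDigits (tonineLoop n []).reverse = tonine_alt n := by
  by_cases h : 0 < n
  · have h9 : (0:Int) < 9 := by omega
    have hq0 : 0 ≤ PySem.Int.floordiv n 9 := by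
      rw [PySem.Int.floordiv_eq_ediv_of_pos h9]; omega
    have ih := tonine_loop_eq_alt (PySem.Int.floordiv n 9) hq0
    have hd0 : 0 ≤ PySem.Int.mod n 9 := PySem.Int.mod_nonneg n h9
    have hd9 : PySem.Int.mod n 9 < 9 := PySem.Int.mod_lt n h9
    rw [tonineLoop, if_pos h]
    rw [tonine_alt, if_neg (by omega : ¬ n = 0), if_neg (by omega : ¬ n < 0)]
    rw [tonineLoop_append]
    set d := PySem.Int.mod n 9 with hd
    by_cases h8 : d = 8
    · rw [if_neg (by simp [h8]), if_pos h8]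
      simp only [List.nil_append, List.reverse_append, List.reverse_cons, List.reverse_nil,
        List.nil_append, List.singleton_append, List.append_nil]
      rw [parseIntDigits_append, ih]
      simp [show (('5'.toNat : Nat) : Int) - 48 = 5 from by decide]
    · have hd8 : d < 8 := by omega
      have hch : PySem.Int.toChars d = [Char.ofNat (d.toNat + 48)] := by
        interval_cases d <;> decide
      have hval : ((Char.ofNat (d.toNat + 48)).toNat : Int) - 48 = d := by
        interval_cases d <;> decide
      rw [if_pos (by simp [h8]), if_neg h8, hch]
      simp only [List.nil_append, List.reverse_append, List.reverse_cons, List.reverse_nil,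
        List.nil_append, List.singleton_append, List.append_nil]
      rw [parseIntDigits_append, ih, hval]
  · have h0 : n = 0 := by omega
    subst h0
    rw [tonineLoop]
    simp [parseIntDigits, tonine_alt]
termination_by n.toNat
decreasing_by
  have h9 : (0:Int) < 9 := by omega
  rw [PySem.Int.floordiv_eq_ediv_of_pos h9]
  omega

-- ===== VERDICT (by name: the statement is the Claim_ definition above) =====
theorem tonine_spec : Claim_equal_tonine := by
  intro n _ hpre
  unfold Spec_tonine tonine
  by_cases h0 : n = 0
  · subst h0; simp [tonine_alt]
  · rw [if_neg h0, PySem.List.slice?_none_none_neg_one]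
    simpa using tonine_loop_eq_alt n hpre
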